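-- pv_equiv track=rewrite | github.com/jchang153/causal-abstractions-ot | experiments/mcqa_block_focus/mcqa_ot_das_block_focus.py | _guided_subspace_dims
-- ===== SOURCE A (Python) =====
-- def _guided_subspace_dims(max_width: int) -> tuple[int, ...]:
--     resolved_width = max(1, int(max_width))
--     raw_dims = [
--         32,
--         64,
--         96,
--         128,
--         256,
--         512,
--         768,
--         1024,
--         1536,
--         2048,
--         2304,
--     ]
--     dims = tuple(int(dim) for dim in raw_dims if 1 <= int(dim) <= int(resolved_width))
--     return dims or (resolved_width,)
-- ===== SOURCE B (Python) =====
-- def _guided_subspace_dims(max_width: int) -> tuple[int, ...]: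
--     resolved_width = max(1, int(max_width))
--     raw_dims = (32, 64, 96, 128, 256, 512, 768, 1024, 1536, 2048, 2304)
--     # binary search for the cutoff: first index whose dim exceeds resolved_width
--     lo, hi = 0, len(raw_dims)
--     while lo < hi:
--         mid = (lo + hi) // 2
--         if raw_dims[mid] <= resolved_width:
--             lo = mid + 1
--         else:
--             hi = mid
--     return raw_dims[:lo] if lo else (resolved_width,)
-- ===== Notes on version B (the rewrite author's own statement) =====
-- stated objective: alternative
-- what changed: Replaces the linear scan-and-filter over the fixed dimension list with a binary search for the cutoff index into the (sorted) list, then slices; the fallback singleton is kept.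
import Mathlib
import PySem

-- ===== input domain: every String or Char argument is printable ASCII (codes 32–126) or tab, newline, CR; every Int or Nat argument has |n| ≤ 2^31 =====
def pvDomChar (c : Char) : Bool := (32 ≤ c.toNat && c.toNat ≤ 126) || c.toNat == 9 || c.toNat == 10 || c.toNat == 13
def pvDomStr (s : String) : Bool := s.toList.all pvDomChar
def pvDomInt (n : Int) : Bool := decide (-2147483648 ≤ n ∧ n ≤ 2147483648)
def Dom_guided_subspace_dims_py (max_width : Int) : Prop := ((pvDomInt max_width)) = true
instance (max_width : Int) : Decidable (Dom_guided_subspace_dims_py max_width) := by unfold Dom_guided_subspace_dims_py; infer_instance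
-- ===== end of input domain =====

-- B replaces A's linear filter of the fixed sorted dimension list by a binary search
-- for the cutoff index followed by a slice (alternative algorithm, same result).

-- ===== PORT A =====
def guided_subspace_dims_py (max_width : Int) : List Int :=
  let resolved_width : Int := max 1 max_width
  let raw_dims : List Int := [32, 64, 96, 128, 256, 512, 768, 1024, 1536, 2048, 2304]
  let dims : List Int := raw_dims.filter (fun d => decide (1 ≤ d ∧ d ≤ resolved_width))
  if dims.isEmpty then [resolved_width] else dims

-- ===== PORT B =====
-- binary-search loop of Source B; terminates since hi - lo shrinks
def gsdBsLoop (r : Int) (raw : List Int) (lo hi : Nat) : Nat :=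
  if h : lo < hi then
    let mid := (lo + hi) / 2
    if raw.getD mid 0 ≤ r then gsdBsLoop r raw (mid + 1) hi
    else gsdBsLoop r raw lo mid
  else lo
termination_by hi - lo
decreasing_by all_goals omega

def guided_subspace_dims_py_alt (max_width : Int) : List Int :=
  let resolved_width : Int := max 1 max_width
  let raw_dims : List Int := [32, 64, 96, 128, 256, 512, 768, 1024, 1536, 2048, 2304]
  let lo := gsdBsLoop resolved_width raw_dims 0 raw_dims.length
  if lo = 0 then [resolved_width] else raw_dims.take lo

-- ===== PRECONDITION & SPEC =====
def Spec_guided_subspace_dims_py (max_width : Int) (out : List Int) : Prop := out = guided_subspace_dims_py_alt max_width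
instance (max_width : Int) (out : List Int) : Decidable (Spec_guided_subspace_dims_py max_width out) := by unfold Spec_guided_subspace_dims_py; infer_instance

-- ===== CLAIM (what is proved, stated in full; the proofs are below) =====
def Claim_equal_guided_subspace_dims_py : Prop := ∀ (max_width : Int), Dom_guided_subspace_dims_py max_width → Spec_guided_subspace_dims_py max_width (guided_subspace_dims_py max_width)

-- ===== LEMMAS AND PROOFS =====

theorem gsd_eq (mw : Int) : guided_subspace_dims_py mw = guided_subspace_dims_py_alt mw := by
  unfold guided_subspace_dims_py guided_subspace_dims_py_alt
  have h1 : (1:Int) ≤ max 1 mw := le_max_left _ _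
  revert h1
  generalize max 1 mw = r
  intro h1
  rcases lt_or_ge r 32 with h0|h0
  · simp [gsdBsLoop, List.getD, show ¬((32:Int) ≤ r) from by omega, show ¬((64:Int) ≤ r) from by omega, show ¬((96:Int) ≤ r) from by omega, show ¬((128:Int) ≤ r) from by omega, show ¬((256:Int) ≤ r) from by omega, show ¬((512:Int) ≤ r) from by omega, show ¬((768:Int) ≤ r) from by omega, show ¬((1024:Int) ≤ r) from by omega, show ¬((1536:Int) ≤ r) from by omega, show ¬((2048:Int) ≤ r) from by omega, show ¬((2304:Int) ≤ r) from by omega]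
  rcases lt_or_ge r 64 with h1|h1
  · simp [gsdBsLoop, List.getD, show (32:Int) ≤ r from by omega, show ¬((64:Int) ≤ r) from by omega, show ¬((96:Int) ≤ r) from by omega, show ¬((128:Int) ≤ r) from by omega, show ¬((256:Int) ≤ r) from by omega, show ¬((512:Int) ≤ r) from by omega, show ¬((768:Int) ≤ r) from by omega, show ¬((1024:Int) ≤ r) from by omega, show ¬((1536:Int) ≤ r) from by omega, show ¬((2048:Int) ≤ r) from by omega, show ¬((2304:Int) ≤ r) from by omega]
  rcases lt_or_ge r 96 with h2|h2
  · simp [gsdBsLoop, List.getD, show (32:Int) ≤ r from by omega, show (64:Int) ≤ r from by omega, show ¬((96:Int) ≤ r) from by omega, show ¬((128:Int) ≤ r) from by omega, show ¬((256:Int) ≤ r) from by omega, show ¬((512:Int) ≤ r) from by omega, show ¬((768:Int) ≤ r) from by omega, show ¬((1024:Int) ≤ r) from by omega, show ¬((1536:Int) ≤ r) from by omega, show ¬((2048:Int) ≤ r) from by omega, show ¬((2304:Int) ≤ r) from by omega]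
  rcases lt_or_ge r 128 with h3|h3
  · simp [gsdBsLoop, List.getD, show (32:Int) ≤ r from by omega, show (64:Int) ≤ r from by omega, show (96:Int) ≤ r from by omega, show ¬((128:Int) ≤ r) from by omega, show ¬((256:Int) ≤ r) from by omega, show ¬((512:Int) ≤ r) from by omega, show ¬((768:Int) ≤ r) from by omega, show ¬((1024:Int) ≤ r) from by omega, show ¬((1536:Int) ≤ r) from by omega, show ¬((2048:Int) ≤ r) from by omega, show ¬((2304:Int) ≤ r) from by omega]
  rcases lt_or_ge r 256 with h4|h4
  · simp [gsdBsLoop, List.getD, show (32:Int) ≤ r from by omega, show (64:Int) ≤ r from by omega, show (96:Int) ≤ r from by omega, show (128:Int) ≤ r from by omega, show ¬((256:Int) ≤ r) from by omega, show ¬((512:Int) ≤ r) from by omega, show ¬((768:Int) ≤ r) from by omega, show ¬((1024:Int) ≤ r) from by omega, show ¬((1536:Int) ≤ r) from by omega, show ¬((2048:Int) ≤ r) from by omega, show ¬((2304:Int) ≤ r) from by omega]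
  rcases lt_or_ge r 512 with h5|h5
  · simp [gsdBsLoop, List.getD, show (32:Int) ≤ r from by omega, show (64:Int) ≤ r from by omega, show (96:Int) ≤ r from by omega, show (128:Int) ≤ r from by omega, show (256:Int) ≤ r from by omega, show ¬((512:Int) ≤ r) from by omega, show ¬((768:Int) ≤ r) from by omega, show ¬((1024:Int) ≤ r) from by omega, show ¬((1536:Int) ≤ r) from by omega, show ¬((2048:Int) ≤ r) from by omega, show ¬((2304:Int) ≤ r) from by omega]
  rcases lt_or_ge r 768 with h6|h6
  · simp [gsdBsLoop, List.getD, show (32:Int) ≤ r from by omega, show (64:Int) ≤ r from by omega, show (96:Int) ≤ r from by omega, show (128:Int) ≤ r from by omega, show (256:Int) ≤ r from by omega, show (512:Int) ≤ r from by omega, show ¬((768:Int) ≤ r) from by omega, show ¬((1024:Int) ≤ r) from by omega, show ¬((1536:Int) ≤ r) from by omega, show ¬((2048:Int) ≤ r) from by omega, show ¬((2304:Int) ≤ r) from by omega]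
  rcases lt_or_ge r 1024 with h7|h7
  · simp [gsdBsLoop, List.getD, show (32:Int) ≤ r from by omega, show (64:Int) ≤ r from by omega, show (96:Int) ≤ r from by omega, show (128:Int) ≤ r from by omega, show (256:Int) ≤ r from by omega, show (512:Int) ≤ r from by omega, show (768:Int) ≤ r from by omega, show ¬((1024:Int) ≤ r) from by omega, show ¬((1536:Int) ≤ r) from by omega, show ¬((2048:Int) ≤ r) from by omega, show ¬((2304:Int) ≤ r) from by omega]
  rcases lt_or_ge r 1536 with h8|h8
  · simp [gsdBsLoop, List.getD, show (32:Int) ≤ r from by omega, show (64:Int) ≤ r from by omega, show (96:Int) ≤ r from by omega, show (128:Int) ≤ r from by omega, show (256:Int) ≤ r from by omega, show (512:Int) ≤ r from by omega, show (768:Int) ≤ r from by omega, show (1024:Int) ≤ r from by omega, show ¬((1536:Int) ≤ r) from by omega, show ¬((2048:Int) ≤ r) from by omega, show ¬((2304:Int) ≤ r) from by omega]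
  rcases lt_or_ge r 2048 with h9|h9
  · simp [gsdBsLoop, List.getD, show (32:Int) ≤ r from by omega, show (64:Int) ≤ r from by omega, show (96:Int) ≤ r from by omega, show (128:Int) ≤ r from by omega, show (256:Int) ≤ r from by omega, show (512:Int) ≤ r from by omega, show (768:Int) ≤ r from by omega, show (1024:Int) ≤ r from by omega, show (1536:Int) ≤ r from by omega, show ¬((2048:Int) ≤ r) from by omega, show ¬((2304:Int) ≤ r) from by omega]
  rcases lt_or_ge r 2304 with h10|h10
  · simp [gsdBsLoop, List.getD, show (32:Int) ≤ r from by omega, show (64:Int) ≤ r from by omega, show (96:Int) ≤ r from by omega, show (128:Int) ≤ r from by omega, show (256:Int) ≤ r from by omega, show (512:Int) ≤ r from by omega, show (768:Int) ≤ r from by omega, show (1024:Int) ≤ r from by omega, show (1536:Int) ≤ r from by omega, show (2048:Int) ≤ r from by omega, show ¬((2304:Int) ≤ r) from by omega]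
  · simp [gsdBsLoop, List.getD, show (32:Int) ≤ r from by omega, show (64:Int) ≤ r from by omega, show (96:Int) ≤ r from by omega, show (128:Int) ≤ r from by omega, show (256:Int) ≤ r from by omega, show (512:Int) ≤ r from by omega, show (768:Int) ≤ r from by omega, show (1024:Int) ≤ r from by omega, show (1536:Int) ≤ r from by omega, show (2048:Int) ≤ r from by omega, show (2304:Int) ≤ r from by omega]


-- ===== VERDICT (by name: the statement is the Claim_ definition above) =====
theorem guided_subspace_dims_py_spec : Claim_equal_guided_subspace_dims_py := by
  intro mw _
  unfold Spec_guided_subspace_dims_py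
  exact gsd_eq mw
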